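-- pv_equiv track=rewrite | github.com/jamiewannenburg/uacalcsrc | tests/python/test_partition_compatibility.py | _is_valid_partition
-- ===== SOURCE A (Python) =====
-- from typing import Dict, List, Any, Optional, Tuple, Set
--
-- def _is_valid_partition(blocks: List[List[int]], cardinality: int) -> bool:
--     """Check if blocks form a valid partition"""
--     # Check that all elements are covered exactly once
--     all_elements = set()
--     for block in blocks:
--         for element in block:
--             if element in all_elements:
--                 return False  # Element appears in multiple blocks
--             all_elements.add(element)
--
--     # Check that all elements from 0 to cardinality-1 are covered
--     return all_elements == set(range(cardinality))
-- ===== SOURCE B (Python) =====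
-- def _is_valid_partition(blocks, cardinality):
--     """Check if blocks form a valid partition"""
--     flat = sorted(e for block in blocks for e in block)
--     expected = range(cardinality)
--     return len(flat) == len(expected) and all(v == i for i, v in enumerate(flat))
-- ===== Notes on version B (the rewrite author's own statement) =====
-- stated objective: alternative
-- what changed: Replaces the duplicate-tracking set loop with early return by flattening all blocks, sorting, and checking that the sorted flat list is exactly 0,1,...,cardinality-1 (length test plus positional comparison); this one comparison enforces no-duplicates and exact coverage at once.
import Mathlib
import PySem

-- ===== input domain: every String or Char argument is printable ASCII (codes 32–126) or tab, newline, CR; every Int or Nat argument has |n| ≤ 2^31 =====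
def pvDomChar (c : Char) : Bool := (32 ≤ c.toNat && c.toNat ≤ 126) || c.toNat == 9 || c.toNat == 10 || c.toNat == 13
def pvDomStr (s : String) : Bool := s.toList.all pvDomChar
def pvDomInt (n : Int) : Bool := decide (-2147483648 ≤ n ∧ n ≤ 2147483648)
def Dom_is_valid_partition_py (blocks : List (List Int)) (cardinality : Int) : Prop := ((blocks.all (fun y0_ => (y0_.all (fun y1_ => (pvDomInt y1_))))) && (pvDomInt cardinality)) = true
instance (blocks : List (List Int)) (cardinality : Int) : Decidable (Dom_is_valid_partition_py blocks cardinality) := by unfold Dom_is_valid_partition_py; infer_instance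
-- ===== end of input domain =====

-- B flattens the blocks, sorts, and compares with list(range(cardinality)); A tracks seen elements in a set with an early return on duplicates.

-- ===== PORT A =====
-- inner 'for element in block' loop with its early 'return False'
def pvAInner (acc : PySem.Set Int) : List Int → Option (PySem.Set Int)
  | [] => some acc
  | e :: rest =>
      if PySem.Set.contains acc e then none
      else pvAInner (PySem.Set.add acc e) rest

-- outer 'for block in blocks' loop
def pvAOuter (acc : PySem.Set Int) : List (List Int) → Option (PySem.Set Int)
  | [] => some acc
  | b :: rest =>
      match pvAInner acc b with
      | none => none
      | some acc' => pvAOuter acc' rest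

def is_valid_partition_py (blocks : List (List Int)) (cardinality : Int) : Bool :=
  match pvAOuter PySem.Set.empty blocks with
  | none => false
  | some all_elements =>
      PySem.Set.equal all_elements (PySem.Set.ofList (PySem.List.pyRange 0 cardinality 1))

-- ===== PORT B =====
-- all(v == i for i, v in enumerate(flat)): walk the list with the running index
def pvBCheck : List Int → Int → Bool
  | [], _ => true
  | v :: rest, i => v == i && pvBCheck rest (i + 1)

def is_valid_partition_py_alt (blocks : List (List Int)) (cardinality : Int) : Bool :=
  let flat := PySem.List.sorted (blocks.flatMap (fun block => block)) (fun x => x) false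
  -- len(range(cardinality)) is computed in closed form, exactly as Python does: max(cardinality, 0)
  (flat.length == cardinality.toNat) && pvBCheck flat 0

-- ===== PRECONDITION & SPEC =====
def Spec_is_valid_partition_py (blocks : List (List Int)) (cardinality : Int) (out : Bool) : Prop := out = is_valid_partition_py_alt blocks cardinality
instance (blocks : List (List Int)) (cardinality : Int) (out : Bool) : Decidable (Spec_is_valid_partition_py blocks cardinality out) := by unfold Spec_is_valid_partition_py; infer_instance

-- ===== CLAIM (what is proved, stated in full; the proofs are below) =====
def Claim_equal_is_valid_partition_py : Prop := ∀ (blocks : List (List Int)) (cardinality : Int), Dom_is_valid_partition_py blocks cardinality → Spec_is_valid_partition_py blocks cardinality (is_valid_partition_py blocks cardinality)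

-- ===== LEMMAS AND PROOFS =====

-- inner loop characterisation
theorem pvAInner_spec (l : List Int) (acc : PySem.Set Int) (hacc : acc.Nodup) :
    pvAInner acc l = if (acc ++ l).Nodup then some (acc ++ l) else none := by
  induction l generalizing acc with
  | nil => simp [pvAInner, hacc]
  | cons e rest ih =>
      simp only [pvAInner]
      by_cases he : e ∈ acc
      · have : ¬ (acc ++ e :: rest).Nodup := by
          intro h
          exact (List.disjoint_of_nodup_append h) he (by simp)
        simp [he, this]
      · rw [if_neg (by simp [he])]
        rw [ih _ (PySem.Set.nodup_add acc e hacc), PySem.Set.add_of_not_mem he]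
        have : (acc ++ [e] ++ rest) = acc ++ e :: rest := by simp
        rw [this]

-- append splitting for the inner loop
theorem pvAInner_append (l1 l2 : List Int) (acc : PySem.Set Int) (hacc : acc.Nodup) :
    pvAInner acc (l1 ++ l2) = (pvAInner acc l1).bind (fun s => pvAInner s l2) := by
  rw [pvAInner_spec _ _ hacc, pvAInner_spec _ _ hacc]
  by_cases h : (acc ++ (l1 ++ l2)).Nodup
  · have h1 : (acc ++ l1).Nodup := by
      have := h; rw [← List.append_assoc] at this
      exact this.sublist (List.sublist_append_left _ _)
    rw [if_pos h, if_pos h1]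
    simp only [Option.bind_some]
    rw [pvAInner_spec _ _ h1]
    rw [List.append_assoc] at *
    rw [if_pos (by rw [← List.append_assoc]; rw [← List.append_assoc] at h; exact h)]
  · rw [if_neg h]
    by_cases h1 : (acc ++ l1).Nodup
    · rw [if_pos h1]
      simp only [Option.bind_some]
      rw [pvAInner_spec _ _ h1, if_neg (by rw [List.append_assoc]; exact h)]
    · rw [if_neg h1]; rfl

-- the outer loop is the inner loop over the flattening
theorem pvAOuter_eq_inner_flat (blocks : List (List Int)) (acc : PySem.Set Int) (hacc : acc.Nodup) :
    pvAOuter acc blocks = pvAInner acc (blocks.flatMap (fun b => b)) := by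
  induction blocks generalizing acc with
  | nil => simp [pvAOuter, pvAInner]
  | cons b rest ih =>
      simp only [pvAOuter, List.flatMap_cons]
      rw [pvAInner_append _ _ _ hacc]
      cases h : pvAInner acc b with
      | none => rfl
      | some s =>
          have hs : s.Nodup := by
            rw [pvAInner_spec _ _ hacc] at h
            split_ifs at h with hn
            · cases h; exact hn
          simp [ih s hs]

-- pvBCheck says the list counts up from its start index
theorem pvBCheck_iff (xs : List Int) (i : Int) :
    pvBCheck xs i = true ↔ xs = PySem.List.pyRange i (i + xs.length) 1 := by
  induction xs generalizing i with
  | nil =>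
      simp only [pvBCheck, List.length_nil, Nat.cast_zero, add_zero, true_iff]
      exact (PySem.List.pyRange_one_eq_nil (le_refl i)).symm
  | cons v rest ih =>
      have hend : i + ((rest.length : Int) + 1) = (i + 1) + (rest.length : Int) := by ring
      simp only [pvBCheck, Bool.and_eq_true, beq_iff_eq, List.length_cons]
      push_cast
      rw [hend, PySem.List.pyRange_one_cons (by omega),
          List.cons.injEq, ih (i + 1)]

-- pvBCheck accepts a range starting at 0
theorem pvBCheck_range (n : Nat) : pvBCheck (PySem.List.pyRange 0 (n : Int) 1) 0 = true := by
  rw [pvBCheck_iff]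
  congr 1
  rw [PySem.List.length_pyRange_one]
  omega

-- the range to cardinality equals the range to cardinality.toNat
theorem pyRange_toNat (c : Int) :
    PySem.List.pyRange 0 c 1 = PySem.List.pyRange 0 (c.toNat : Int) 1 := by
  rw [PySem.List.pyRange_one, PySem.List.pyRange_one]
  have h : (c - 0).toNat = ((c.toNat : Int) - 0).toNat := by omega
  rw [h]

-- B's length test plus positional walk is exactly the list comparison with the range
theorem alt_eq_decide (blocks : List (List Int)) (cardinality : Int) :
    is_valid_partition_py_alt blocks cardinality =
      decide (PySem.List.sorted (blocks.flatMap (fun b => b)) (fun x => x) false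
                = PySem.List.pyRange 0 cardinality 1) := by
  unfold is_valid_partition_py_alt
  rw [pyRange_toNat]
  set flat := PySem.List.sorted (blocks.flatMap (fun b => b)) (fun x => x) false with hf
  set R := PySem.List.pyRange 0 (cardinality.toNat : Int) 1 with hR
  show (flat.length == cardinality.toNat && pvBCheck flat 0) = decide (flat = R)
  have hRlen : R.length = cardinality.toNat := by
    rw [hR, PySem.List.length_pyRange_one]; omega
  by_cases hlen : flat.length = cardinality.toNat
  · by_cases hchk : pvBCheck flat 0 = true
    · have heq : flat = R := by
        rw [(pvBCheck_iff flat 0).mp hchk, hR]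
        congr 1
        omega
      rw [show (flat.length == cardinality.toNat) = true from beq_iff_eq.mpr hlen,
          hchk, decide_eq_true heq]
      rfl
    · have hne : flat ≠ R := fun h => hchk (by rw [h, hR]; exact pvBCheck_range cardinality.toNat)
      simp only [Bool.not_eq_true] at hchk
      rw [hchk, decide_eq_false hne, Bool.and_false]
  · have hne : flat ≠ R := fun h => hlen (by rw [h, hRlen])
    rw [beq_eq_false_iff_ne.mpr hlen, decide_eq_false hne, Bool.false_and]

-- sorted flat equals the range iff flat is duplicate-free with exactly the range's members
theorem sorted_eq_range_iff (flat : List Int) (c : Int) :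
    (PySem.List.sorted flat (fun x => x) false = PySem.List.pyRange 0 c 1) ↔
      (flat.Nodup ∧ ∀ x, x ∈ flat ↔ x ∈ PySem.List.pyRange 0 c 1) := by
  constructor
  · intro h
    have hperm : flat.Perm (PySem.List.pyRange 0 c 1) := by
      have := PySem.List.sorted_perm flat (fun x => x) false
      rw [h] at this
      exact this.symm
    refine ⟨hperm.nodup_iff.mpr (PySem.List.nodup_pyRange_one 0 c), fun x => hperm.mem_iff⟩
  · rintro ⟨hnd, hmem⟩
    apply PySem.List.sorted_eq_of_perm_of_pairwise_lt
    · exact ((List.perm_ext_iff_of_nodup (PySem.List.nodup_pyRange_one 0 c) hnd).mpr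
        (fun x => (hmem x).symm))
    · exact PySem.List.pairwise_lt_pyRange_one 0 c

-- ===== VERDICT (by name: the statement is the Claim_ definition above) =====
theorem is_valid_partition_py_spec : Claim_equal_is_valid_partition_py := by
  intro blocks cardinality _
  unfold Spec_is_valid_partition_py
  rw [alt_eq_decide]
  unfold is_valid_partition_py
  show (match pvAOuter PySem.Set.empty blocks with
    | none => false
    | some all_elements => PySem.Set.equal all_elements (PySem.Set.ofList (PySem.List.pyRange 0 cardinality 1))) = _
  simp only [PySem.Set.empty]
  rw [pvAOuter_eq_inner_flat _ _ List.nodup_nil, pvAInner_spec _ _ List.nodup_nil]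
  set flat := blocks.flatMap (fun b => b) with hflat
  simp only [List.nil_append]
  by_cases hnd : flat.Nodup
  · rw [if_pos hnd]
    simp only []
    by_cases hmem : ∀ x, x ∈ flat ↔ x ∈ PySem.List.pyRange 0 cardinality 1
    · have hA : PySem.Set.equal flat (PySem.Set.ofList (PySem.List.pyRange 0 cardinality 1)) = true := by
        rw [PySem.Set.equal_iff]
        intro x
        rw [PySem.Set.mem_ofList]
        exact hmem x
      rw [hA]
      have hB : PySem.List.sorted flat (fun x => x) false = PySem.List.pyRange 0 cardinality 1 :=
        (sorted_eq_range_iff flat cardinality).mpr ⟨hnd, hmem⟩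
      simp [hB]
    · have hA : PySem.Set.equal flat (PySem.Set.ofList (PySem.List.pyRange 0 cardinality 1)) = false := by
        rw [Bool.eq_false_iff]
        intro hc
        exact hmem (fun x => by
          have := (PySem.Set.equal_iff flat _).mp hc x
          rwa [PySem.Set.mem_ofList] at this)
      rw [hA]
      have hB : ¬ PySem.List.sorted flat (fun x => x) false = PySem.List.pyRange 0 cardinality 1 := by
        intro hc
        exact hmem ((sorted_eq_range_iff flat cardinality).mp hc).2
      simp [hB]
  · rw [if_neg hnd]
    have hB : ¬ PySem.List.sorted flat (fun x => x) false = PySem.List.pyRange 0 cardinality 1 := by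
      intro hc
      exact hnd ((sorted_eq_range_iff flat cardinality).mp hc).1
    simp [hB]
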